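-- pv_equiv track=rewrite | github.com/ArduPilot/ardupilot_wiki | rst_table.py | tablify_calc_row_widths_heights
-- ===== SOURCE A (Python) =====
-- def tablify_longest_row_length(rows, rowheadings, headings):
--     check_width_rows = rows[:]
--     if headings is not None:
--         check_width_rows.append(headings)
--     longest_row_length = 0
--     for row in check_width_rows:
--         if len(row) > longest_row_length:
--             longest_row_length = len(row)
--     if rowheadings is not None:
--         longest_row_length += 1
--     return longest_row_length
--
-- def longest_line_in_string(string):
--     longest = 0
--     for line in string.split("\n"):
--         if len(line) > longest:
--             longest = len(line)
--     return longest
--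
-- def tablify_calc_row_widths_heights(rows, rowheadings, headings):
--     rows_to_check = []
--     if headings is not None:
--         rows_to_check.append(headings)
--     rows_to_check.extend(rows[:])
--
--     heights = [0] * len(rows_to_check)
--
--     longest_row_length = tablify_longest_row_length(rows, rowheadings, headings)
--     widths = [0] * longest_row_length
--
--     all_rowheadings = []
--     if rowheadings is not None:
--         if headings is not None:
--             all_rowheadings.append("")
--         all_rowheadings.extend(rowheadings)
--
--     for rownum in range(0, len(rows_to_check)):
--         row = rows_to_check[rownum]
--         values_to_check = []
--         if rowheadings is not None:
--             values_to_check.append(all_rowheadings[rownum])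
--         values_to_check.extend(row[:])
--         colnum = 0
--         for value in values_to_check:
--             height = len(value.split("\n"))
--             if height > heights[rownum]:
--                 heights[rownum] = height
--             longest_line = longest_line_in_string(value)
--             width = longest_line + 2  # +2 for leading/trailing ws
--             if width > widths[colnum]:
--                 widths[colnum] = width
--             colnum += 1
--     return (widths, heights)
-- ===== SOURCE B (Python) =====
-- def tablify_calc_row_widths_heights(rows, rowheadings, headings):
--     has_rh = rowheadings is not None
--     grid = []
--     if headings is not None:
--         grid.append(([""] if has_rh else []) + list(headings))
--     for i, row in enumerate(rows):
--         grid.append(([rowheadings[i]] if has_rh else []) + list(row))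
--     heights = [max((len(c.split("\n")) for c in row), default=0) for row in grid]
--     body = rows + ([headings] if headings is not None else [])
--     ncols = (1 if has_rh else 0) + max((len(r) for r in body), default=0)
--     cols = [[] for _ in range(ncols)]
--     for row in grid:
--         for j, c in enumerate(row):
--             cols[j].append(c)
--     widths = [max((max(len(line) for line in c.split("\n")) + 2 for c in col), default=0)
--               for col in cols]
--     return (widths, heights)
-- ===== Notes on version B (the rewrite author's own statement) =====
-- stated objective: simpler
-- what changed: B assembles the full table grid (rowheadings column plus headings row) once, computes heights as a per-row reduction, and computes widths column-wise after transposing the grid into per-column buckets in one pass, replacing A's single interleaved loop that mutates width/height arrays through manual rownum/colnum indexing and its longest-row/longest-line helper functions.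
import Mathlib
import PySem

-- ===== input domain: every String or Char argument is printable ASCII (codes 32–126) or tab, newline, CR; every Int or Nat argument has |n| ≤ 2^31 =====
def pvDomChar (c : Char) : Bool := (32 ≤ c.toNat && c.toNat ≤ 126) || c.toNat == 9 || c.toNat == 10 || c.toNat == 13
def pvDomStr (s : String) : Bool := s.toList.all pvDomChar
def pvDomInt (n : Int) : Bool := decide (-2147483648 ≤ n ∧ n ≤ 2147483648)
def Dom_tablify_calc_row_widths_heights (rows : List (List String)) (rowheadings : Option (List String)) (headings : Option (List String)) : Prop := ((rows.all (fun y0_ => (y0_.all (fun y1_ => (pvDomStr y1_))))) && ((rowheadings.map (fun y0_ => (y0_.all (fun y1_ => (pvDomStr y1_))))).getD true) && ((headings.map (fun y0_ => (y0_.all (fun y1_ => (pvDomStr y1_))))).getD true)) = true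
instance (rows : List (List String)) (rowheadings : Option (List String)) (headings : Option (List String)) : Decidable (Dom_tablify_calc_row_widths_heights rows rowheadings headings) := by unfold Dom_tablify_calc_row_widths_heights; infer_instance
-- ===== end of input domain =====

-- B replaces A's single interleaved row/column scan with mutable width/height arrays by
-- assembling the full grid once and doing two axis-wise reductions (simpler decomposition, same cost).

-- shared primitive: value.split("\n") — the separator "\n" is never "", so split? never returns none
def pvSplitNL (s : String) : List String := (PySem.Str.split? s "\n").getD []

-- ===== PORT A =====
def pvLongestLineInString (s : String) : Int :=
  (pvSplitNL s).foldl (fun longest line => if PySem.Str.len line > longest then PySem.Str.len line else longest) 0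

def pvLongestRowLength (rows : List (List String)) (rowheadings : Option (List String)) (headings : Option (List String)) : Int :=
  let check_width_rows := rows ++ (match headings with | some h => [h] | none => [])
  let l := check_width_rows.foldl (fun acc row => if PySem.List.len row > acc then PySem.List.len row else acc) 0
  match rowheadings with | some _ => l + 1 | none => l

-- the body of A's outer loop (one rownum); loop indices are the Nat counters Python's
-- range/colnum produce, always nonnegative and (inside Pre_) in range, so getD/set are exact
def pvAInner (rownum : Nat) (values : List String) (ws : List Int) (hs : List Int) : List Int × List Int :=
  (values.foldl (fun (st : (List Int × List Int) × Nat) value =>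
      let height : Int := PySem.List.len (pvSplitNL value)
      let hs' := if height > st.1.2.getD rownum 0 then st.1.2.set rownum height else st.1.2
      let width := pvLongestLineInString value + 2
      let ws' := if width > st.1.1.getD st.2 0 then st.1.1.set st.2 width else st.1.1
      ((ws', hs'), st.2 + 1)) ((ws, hs), 0)).1

def tablify_calc_row_widths_heights (rows : List (List String)) (rowheadings : Option (List String)) (headings : Option (List String)) : List Int × List Int :=
  let rows_to_check := (match headings with | some h => [h] | none => []) ++ rows
  let heights : List Int := List.replicate rows_to_check.length 0
  let widths : List Int := List.replicate (pvLongestRowLength rows rowheadings headings).toNat 0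
  let all_rowheadings : List String :=
    match rowheadings with
    | some rh => (match headings with | some _ => [""] | none => []) ++ rh
    | none => []
  (List.range rows_to_check.length).foldl (fun st rownum =>
    let row := rows_to_check.getD rownum []
    let values := (match rowheadings with | some _ => [all_rowheadings.getD rownum ""] | none => []) ++ row
    pvAInner rownum values st.1 st.2) (widths, heights)

-- ===== PORT B =====
def pvCellHeight (c : String) : Int := PySem.List.len (pvSplitNL c)

-- Source B: max(len(line) for line in c.split("\n")) + 2; split("\n") never yields an empty list, so the default 0 is dead
def pvCellWidth (c : String) : Int :=
  PySem.List.maxD ((pvSplitNL c).map PySem.Str.len) (fun x => x) 0 + 2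

-- Source B's inner transpose loop 'for j, c in enumerate(row): cols[j].append(c)';
-- j is enumerate's nonnegative counter and always < len(cols), so getD/set are exact
def pvColsAdd (cols : List (List String)) (c : Nat) : List String → List (List String)
  | [] => cols
  | v :: t => pvColsAdd (cols.set c (cols.getD c [] ++ [v])) (c + 1) t

def tablify_calc_row_widths_heights_alt (rows : List (List String)) (rowheadings : Option (List String)) (headings : Option (List String)) : List Int × List Int :=
  let grid : List (List String) :=
    (match headings with
     | some h => [(match rowheadings with | some _ => [""] | none => []) ++ h]
     | none => []) ++
    (PySem.List.enumerate rows).map (fun p =>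
      (match rowheadings with | some rh => [PySem.List.pyGetD rh p.1 ""] | none => []) ++ p.2)
  let heights : List Int := grid.map (fun row => PySem.List.maxD (row.map pvCellHeight) (fun x => x) 0)
  let body := rows ++ (match headings with | some h => [h] | none => [])
  let ncols : Int := (match rowheadings with | some _ => 1 | none => 0) +
    PySem.List.maxD (body.map PySem.List.len) (fun x => x) 0
  let cols : List (List String) :=
    grid.foldl (fun cols row => pvColsAdd cols 0 row) ((List.range ncols.toNat).map (fun _ => []))
  let widths : List Int := cols.map (fun col => PySem.List.maxD (col.map pvCellWidth) (fun x => x) 0)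
  (widths, heights)

-- ===== PRECONDITION & SPEC =====
-- Pre_ excludes exactly the inputs where Python A raises IndexError (rowheadings given but
-- shorter than rows); Python B raises IndexError on exactly the same inputs.
def Pre_tablify_calc_row_widths_heights (rows : List (List String)) (rowheadings : Option (List String)) (headings : Option (List String)) : Prop :=
  (rowheadings.elim true (fun rh => decide (rows.length ≤ rh.length))) = true
instance (rows : List (List String)) (rowheadings : Option (List String)) (headings : Option (List String)) : Decidable (Pre_tablify_calc_row_widths_heights rows rowheadings headings) := by unfold Pre_tablify_calc_row_widths_heights; infer_instance

def pvWitness_tablify_calc_row_widths_heights : List (List String) × Option (List String) × Option (List String) :=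
  ([["a"], ["b\nc", "dd"]], (some ["r1", "r2"], some ["h1", "h2"]))

def Spec_tablify_calc_row_widths_heights (rows : List (List String)) (rowheadings : Option (List String)) (headings : Option (List String)) (out : List Int × List Int) : Prop := out = tablify_calc_row_widths_heights_alt rows rowheadings headings
instance (rows : List (List String)) (rowheadings : Option (List String)) (headings : Option (List String)) (out : List Int × List Int) : Decidable (Spec_tablify_calc_row_widths_heights rows rowheadings headings out) := by unfold Spec_tablify_calc_row_widths_heights; infer_instance

-- ===== CLAIM (what is proved, stated in full; the proofs are below) =====
def Claim_equal_tablify_calc_row_widths_heights : Prop := ∀ (rows : List (List String)) (rowheadings : Option (List String)) (headings : Option (List String)), Dom_tablify_calc_row_widths_heights rows rowheadings headings → Pre_tablify_calc_row_widths_heights rows rowheadings headings → Spec_tablify_calc_row_widths_heights rows rowheadings headings (tablify_calc_row_widths_heights rows rowheadings headings)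

-- ===== LEMMAS AND PROOFS =====

theorem pv_if_max (a x : Int) : (if x > a then x else a) = max a x := by
  rw [max_def]; split_ifs <;> omega

theorem pv_foldl_if_max {α : Type} (f : α → Int) (l : List α) :
    ∀ a : Int, l.foldl (fun acc v => if f v > acc then f v else acc) a = (l.map f).foldl max a := by
  intro a
  have hfun : (fun (acc : Int) (v : α) => if f v > acc then f v else acc)
      = fun acc v => max acc (f v) := by
    funext acc v; exact pv_if_max acc (f v)
  rw [hfun, List.foldl_map]

theorem pv_maxD_eq_foldl (l : List Int) (h : ∀ x ∈ l, 0 ≤ x) :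
    PySem.List.maxD l (fun y => y) 0 = l.foldl max 0 := by
  cases l with
  | nil => rfl
  | cons x t =>
    have hx : (0 : Int) ≤ x := h x (by simp)
    simp only [PySem.List.maxD, PySem.List.max?_id_cons, Option.getD_some, List.foldl_cons]
    rw [max_eq_right hx]

theorem pv_set_getD_self {α : Type} (xs : List α) (i : Nat) (d : α) : xs.set i (xs.getD i d) = xs := by
  by_cases hi : i < xs.length
  · rw [List.getD_eq_getElem _ _ hi]; exact List.set_getElem_self hi
  · exact List.set_eq_of_length_le (Nat.le_of_not_lt hi)

theorem pv_upd_max (xs : List Int) (i : Nat) (x : Int) :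
    (if x > xs.getD i 0 then xs.set i x else xs) = xs.set i (max (xs.getD i 0) x) := by
  split_ifs with h
  · rw [max_eq_right (le_of_lt h)]
  · rw [max_eq_left (by omega), pv_set_getD_self]


theorem pv_getD_set {α : Type} (xs : List α) (i j : Nat) (a d : α) :
    (xs.set i a).getD j d = if i = j ∧ i < xs.length then a else xs.getD j d := by
  split_ifs with h
  · obtain ⟨rfl, hi⟩ := h
    rw [List.getD_eq_getElem _ _ (by simpa using hi)]
    simp [List.getElem_set_self]
  · rcases Decidable.em (i = j) with rfl | hne
    · have hi : xs.length ≤ i := by omega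
      rw [List.set_eq_of_length_le hi]
    · by_cases hj : j < xs.length
      · rw [List.getD_eq_getElem _ _ (by simpa using hj), List.getD_eq_getElem _ _ hj]
        exact List.getElem_set_ne hne _
      · rw [List.getD_eq_default _ _ (by simpa using Nat.le_of_not_lt hj),
            List.getD_eq_default _ _ (Nat.le_of_not_lt hj)]

-- the two separated loops A's single interleaved loop computes
def pvWgo (ws : List Int) (c : Nat) : List String → List Int
  | [] => ws
  | v :: t => pvWgo (ws.set c (max (ws.getD c 0) (pvLongestLineInString v + 2))) (c + 1) t

def pvHgo (r : Nat) (hs : List Int) : List String → List Int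
  | [] => hs
  | v :: t => pvHgo r (hs.set r (max (hs.getD r 0) (PySem.List.len (pvSplitNL v)))) t

theorem pvAInner_eq (r : Nat) (vals : List String) :
    ∀ (ws hs : List Int) (c : Nat),
    (vals.foldl (fun (st : (List Int × List Int) × Nat) value =>
      let height : Int := PySem.List.len (pvSplitNL value)
      let hs' := if height > st.1.2.getD r 0 then st.1.2.set r height else st.1.2
      let width := pvLongestLineInString value + 2
      let ws' := if width > st.1.1.getD st.2 0 then st.1.1.set st.2 width else st.1.1
      ((ws', hs'), st.2 + 1)) ((ws, hs), c)).1 = (pvWgo ws c vals, pvHgo r hs vals) := by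
  induction vals with
  | nil => intro ws hs c; rfl
  | cons v t ih =>
    intro ws hs c
    simp only [List.foldl_cons]
    rw [pv_upd_max, pv_upd_max]
    simp only [pvWgo, pvHgo]
    exact ih _ _ _

theorem pvAInner_spec (r : Nat) (vals : List String) (ws hs : List Int) :
    pvAInner r vals ws hs = (pvWgo ws 0 vals, pvHgo r hs vals) := pvAInner_eq r vals ws hs 0

theorem pvHgo_eq (r : Nat) (vals : List String) :
    ∀ hs : List Int, pvHgo r hs vals
      = hs.set r ((vals.map (fun v => PySem.List.len (pvSplitNL v))).foldl max (hs.getD r 0)) := by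
  induction vals with
  | nil =>
    intro hs
    simp only [pvHgo, List.map_nil, List.foldl_nil]
    exact (pv_set_getD_self hs r 0).symm
  | cons v t ih =>
    intro hs
    rw [pvHgo, ih]
    by_cases hr : r < hs.length
    · rw [pv_getD_set, if_pos ⟨rfl, hr⟩, List.set_set, List.map_cons, List.foldl_cons]
    · have hset : ∀ v : Int, hs.set r v = hs :=
        fun v => List.set_eq_of_length_le (Nat.le_of_not_lt hr)
      simp only [hset]

theorem pvWgo_length (vals : List String) : ∀ (ws : List Int) (c : Nat),
    (pvWgo ws c vals).length = ws.length := by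
  induction vals with
  | nil => intro ws c; rfl
  | cons v t ih => intro ws c; simp [pvWgo, ih]

theorem pvWgo_getD (vals : List String) : ∀ (ws : List Int) (c j : Nat),
    (pvWgo ws c vals).getD j 0 =
      if c ≤ j ∧ j - c < vals.length ∧ j < ws.length
      then max (ws.getD j 0) (pvLongestLineInString (vals.getD (j - c) "") + 2)
      else ws.getD j 0 := by
  induction vals with
  | nil => intro ws c j; simp [pvWgo]
  | cons v t ih =>
    intro ws c j
    simp only [pvWgo, ih, List.length_set, List.length_cons]
    rw [pv_getD_set]
    by_cases hj : j = c
    · subst hj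
      by_cases hl : j < ws.length
      · simp only [Nat.sub_self, List.getD_cons_zero]
        have h1 : ¬ (j + 1 ≤ j) := by omega
        simp [h1, hl]
      · have h2 : ¬ (j + 1 ≤ j) := by omega
        simp [h2, hl]
    · have hne : ¬ (c = j ∧ c < ws.length) := by tauto
      rw [if_neg hne]
      by_cases hcj : c ≤ j
      · have hc1 : c + 1 ≤ j := by omega
        have he : (v :: t).getD (j - c) "" = t.getD (j - (c + 1)) "" := by
          have : j - c = (j - (c + 1)) + 1 := by omega
          rw [this, List.getD_cons_succ]
        have hiff : (c + 1 ≤ j ∧ j - (c + 1) < t.length ∧ j < ws.length)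
            ↔ (c ≤ j ∧ j - c < t.length + 1 ∧ j < ws.length) := by omega
        rw [he]
        split_ifs with h1 h2 h2 <;> first | rfl | (exfalso; omega)
      · have h1 : ¬ (c + 1 ≤ j) := by omega
        simp [h1, hcj]

theorem pv_range_fold {σ : Type} (G : List (List String)) (F : σ → Nat → List String → σ) :
    ∀ (d : List (List String)) (s : Nat), G.drop s = d → ∀ a : σ,
    (List.range' s d.length).foldl (fun a i => F a i (G.getD i [])) a
      = (d.zipIdx s).foldl (fun a p => F a p.2 p.1) a := by
  intro d
  induction d with
  | nil => intro s _ a; rfl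
  | cons r t ih =>
    intro s hd a
    have hget : G.getD s [] = r := by
      have h0 : (G.drop s)[0]? = some r := by rw [hd]; rfl
      rw [List.getElem?_drop] at h0
      rw [List.getD_eq_getElem?_getD]
      simp at h0; simp [h0]
    have hdrop : G.drop (s + 1) = t := by
      have : (G.drop s).drop 1 = G.drop (s + 1) := by
        rw [List.drop_drop]
      rw [← this, hd]; rfl
    simp only [List.length_cons]
    rw [List.range'_succ, List.foldl_cons, List.zipIdx_cons, List.foldl_cons, hget]
    exact ih (s + 1) hdrop _

theorem pv_zipIdx_map_idx {α β : Type} (l : List α) (f : α → Nat → β) :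
    ∀ s : Nat, ((l.zipIdx s).map (fun p => f p.1 p.2)).zipIdx s
      = (l.zipIdx s).map (fun p => (f p.1 p.2, p.2)) := by
  induction l with
  | nil => intro s; rfl
  | cons x t ih =>
    intro s
    simp only [List.zipIdx_cons, List.map_cons]
    exact congrArg (List.cons _) (ih (s + 1))

theorem pv_enum_zip (rh arh : List String) (off : Nat)
    (harh : ∀ k : Nat, arh.getD (k + off) "" = rh.getD k "") (rows : List (List String)) :
    ∀ k : Nat, (PySem.List.enumerate rows (k : Int)).map (fun p => [PySem.List.pyGetD rh p.1 ""] ++ p.2)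
      = (rows.zipIdx (k + off)).map (fun p => [arh.getD p.2 ""] ++ p.1) := by
  induction rows with
  | nil => intro k; rfl
  | cons r t ih =>
    intro k
    rw [PySem.List.enumerate_cons, List.zipIdx_cons, List.map_cons, List.map_cons]
    have h1 : PySem.List.pyGetD rh (k : Int) "" = rh.getD k "" := PySem.List.pyGetD_natCast rh k ""
    have h2 : ((k : Int) + 1) = ((k + 1 : Nat) : Int) := by push_cast; ring
    have h3 : k + off + 1 = (k + 1) + off := by omega
    rw [h1, harh k, h2, ih (k + 1), h3]

theorem pvW_fold_len (G : List (List String)) : ∀ ws : List Int,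
    (G.foldl (fun ws row => pvWgo ws 0 row) ws).length = ws.length := by
  induction G with
  | nil => intro ws; rfl
  | cons r t ih => intro ws; simp [List.foldl_cons, ih, pvWgo_length]

theorem pvW_fold_getD (G : List (List String)) : ∀ (ws : List Int) (j : Nat), j < ws.length →
    (G.foldl (fun ws row => pvWgo ws 0 row) ws).getD j 0
      = G.foldl (fun a row => if j < row.length then max a (pvLongestLineInString (row.getD j "") + 2) else a) (ws.getD j 0) := by
  induction G with
  | nil => intro ws j _; rfl
  | cons r t ih =>
    intro ws j hj
    rw [List.foldl_cons, List.foldl_cons, ih _ j (by rw [pvWgo_length]; exact hj)]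
    congr 1
    rw [pvWgo_getD]
    simp [hj]

-- the j-th column of the assembled grid: the j-th cell of every row that reaches column j
def pvCol (j : Nat) (G : List (List String)) : List String :=
  (G.filter (fun row => decide (j < row.length))).map (fun row => row.getD j "")

theorem pv_cond_col (j : Nat) (G : List (List String)) : ∀ a : Int,
    G.foldl (fun a row => if j < row.length then max a (pvLongestLineInString (row.getD j "") + 2) else a) a
      = ((pvCol j G).map (fun c => pvLongestLineInString c + 2)).foldl max a := by
  induction G with
  | nil => intro a; rfl
  | cons r t ih =>
    intro a
    rw [List.foldl_cons]
    unfold pvCol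
    rw [List.filter_cons]
    by_cases hr : j < r.length
    · rw [if_pos hr, if_pos (by simpa using hr), List.map_cons, List.map_cons, List.foldl_cons]
      exact ih _
    · rw [if_neg hr, if_neg (by simpa using hr)]
      exact ih _

theorem pvColsAdd_length (row : List String) : ∀ (cols : List (List String)) (c : Nat),
    (pvColsAdd cols c row).length = cols.length := by
  induction row with
  | nil => intro cols c; rfl
  | cons v t ih => intro cols c; simp [pvColsAdd, ih]

theorem pvColsAdd_getD (row : List String) : ∀ (cols : List (List String)) (c j : Nat),
    (pvColsAdd cols c row).getD j [] =
      if c ≤ j ∧ j - c < row.length ∧ j < cols.length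
      then cols.getD j [] ++ [row.getD (j - c) ""]
      else cols.getD j [] := by
  induction row with
  | nil => intro cols c j; simp [pvColsAdd]
  | cons v t ih =>
    intro cols c j
    simp only [pvColsAdd, ih, List.length_set, List.length_cons]
    rw [pv_getD_set]
    by_cases hj : j = c
    · subst hj
      by_cases hl : j < cols.length
      · simp only [Nat.sub_self, List.getD_cons_zero]
        have h1 : ¬ (j + 1 ≤ j) := by omega
        simp [h1, hl]
      · have h2 : ¬ (j + 1 ≤ j) := by omega
        simp [h2, hl]
    · have hne : ¬ (c = j ∧ c < cols.length) := by tauto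
      rw [if_neg hne]
      by_cases hcj : c ≤ j
      · have hc1 : c + 1 ≤ j := by omega
        have he : (v :: t).getD (j - c) "" = t.getD (j - (c + 1)) "" := by
          have : j - c = (j - (c + 1)) + 1 := by omega
          rw [this, List.getD_cons_succ]
        rw [he]
        split_ifs with h1 h2 h2 <;> first | rfl | (exfalso; omega)
      · have h1 : ¬ (c + 1 ≤ j) := by omega
        simp [h1, hcj]

theorem pvCols_fold_len (G : List (List String)) : ∀ cols : List (List String),
    (G.foldl (fun cols row => pvColsAdd cols 0 row) cols).length = cols.length := by
  induction G with
  | nil => intro cols; rfl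
  | cons r t ih => intro cols; simp [List.foldl_cons, ih, pvColsAdd_length]

theorem pvCols_fold_getD (G : List (List String)) : ∀ (cols : List (List String)) (j : Nat), j < cols.length →
    (G.foldl (fun cols row => pvColsAdd cols 0 row) cols).getD j []
      = cols.getD j [] ++ pvCol j G := by
  induction G with
  | nil => intro cols j _; simp [pvCol]
  | cons r t ih =>
    intro cols j hj
    rw [List.foldl_cons, ih _ j (by rw [pvColsAdd_length]; exact hj), pvColsAdd_getD]
    unfold pvCol
    rw [List.filter_cons]
    by_cases hr : j < r.length
    · simp [hr, hj]
    · simp [hr, hj]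

theorem pv_getD_range_nil (n j : Nat) : (((List.range n).map (fun _ => ([] : List String)))).getD j [] = [] := by
  by_cases h : j < n
  · rw [List.getD_eq_getElem _ _ (by simp [h]), List.getElem_map]
  · exact List.getD_eq_default _ _ (by simp [Nat.le_of_not_lt h])

theorem pv_len_nonneg (s : String) : 0 ≤ PySem.Str.len s := by
  simp [PySem.Str.len_eq]

theorem pv_lls_nonneg (s : String) : 0 ≤ pvLongestLineInString s := by
  unfold pvLongestLineInString
  rw [pv_foldl_if_max]
  exact (PySem.List.le_foldl_max ((pvSplitNL s).map PySem.Str.len) 0).1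

theorem pv_cellWidth_eq (c : String) : pvCellWidth c = pvLongestLineInString c + 2 := by
  unfold pvCellWidth pvLongestLineInString
  rw [pv_foldl_if_max, pv_maxD_eq_foldl]
  intro x hx
  simp only [List.mem_map] at hx
  obtain ⟨s, _, rfl⟩ := hx
  exact pv_len_nonneg s

theorem pv_getD_append (pre : List Int) (x : Int) (rest : List Int) :
    (pre ++ x :: rest).getD pre.length 0 = x := by
  induction pre with
  | nil => rfl
  | cons p t ih => simpa using ih

theorem pv_set_append (pre : List Int) (x : Int) (rest : List Int) (v : Int) :
    (pre ++ x :: rest).set pre.length v = pre ++ v :: rest := by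
  induction pre with
  | nil => rfl
  | cons p t ih => simpa using ih

theorem pvH_fold (t : List (List String)) : ∀ pre : List Int,
    (t.zipIdx pre.length).foldl (fun hs p => pvHgo p.2 hs p.1) (pre ++ List.replicate t.length 0)
      = pre ++ t.map (fun row => (row.map (fun v => PySem.List.len (pvSplitNL v))).foldl max 0) := by
  induction t with
  | nil => intro pre; simp
  | cons row t ih =>
    intro pre
    rw [List.zipIdx_cons, List.foldl_cons]
    have hrepl : List.replicate (row :: t).length (0 : Int) = 0 :: List.replicate t.length 0 := rfl
    rw [hrepl, pvHgo_eq, pv_getD_append, pv_set_append]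
    have hstate : pre ++ ((row.map (fun v => PySem.List.len (pvSplitNL v))).foldl max 0) :: List.replicate t.length 0
        = (pre ++ [(row.map (fun v => PySem.List.len (pvSplitNL v))).foldl max 0]) ++ List.replicate t.length 0 := by
      simp
    have hlen : pre.length + 1 = (pre ++ [(row.map (fun v => PySem.List.len (pvSplitNL v))).foldl max 0]).length := by
      simp
    rw [hstate, hlen, ih]
    simp

theorem pv_getD_replicate (n i : Nat) : (List.replicate n (0 : Int)).getD i 0 = 0 := by
  by_cases h : i < n
  · rw [List.getD_eq_getElem _ _ (by simp [h])]
    exact List.getElem_replicate _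
  · exact List.getD_eq_default _ _ (by simpa using Nat.le_of_not_lt h)

theorem pv_cellHeight_nonneg (c : String) : 0 ≤ pvCellHeight c := by
  simp [pvCellHeight, PySem.List.len_eq]

theorem pv_len_fold (body : List (List String)) :
    body.foldl (fun acc row => if PySem.List.len row > acc then PySem.List.len row else acc) 0
      = PySem.List.maxD (body.map PySem.List.len) (fun x => x) 0 := by
  rw [pv_foldl_if_max, pv_maxD_eq_foldl]
  intro x hx
  simp only [List.mem_map] at hx
  obtain ⟨r, _, rfl⟩ := hx
  simp [PySem.List.len_eq]

theorem pv_enum_noidx (f : List String → List String) (rows : List (List String)) :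
    ∀ (k : Int) (s : Nat), (PySem.List.enumerate rows k).map (fun p => f p.2)
      = (rows.zipIdx s).map (fun p => f p.1) := by
  induction rows with
  | nil => intro k s; rfl
  | cons r t ih =>
    intro k s
    rw [PySem.List.enumerate_cons, List.zipIdx_cons, List.map_cons, List.map_cons]
    exact congrArg (List.cons _) (ih (k + 1) (s + 1))

theorem pv_main (vals : List String → Nat → List String) (G gridB : List (List String))
    (lrl ncolsB : Int)
    (hgrid : gridB = (G.zipIdx 0).map (fun p => vals p.1 p.2))
    (hncols : lrl = ncolsB) :
    (List.range G.length).foldl (fun st i => pvAInner i (vals (G.getD i []) i) st.1 st.2)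
        (List.replicate lrl.toNat 0, List.replicate G.length 0)
      = ((gridB.foldl (fun cols row => pvColsAdd cols 0 row)
            ((List.range ncolsB.toNat).map (fun _ => []))).map
              (fun col => PySem.List.maxD (col.map pvCellWidth) (fun x => x) 0),
         gridB.map (fun row => PySem.List.maxD (row.map pvCellHeight) (fun x => x) 0)) := by
  subst hgrid
  rw [List.range_eq_range']
  refine (pv_range_fold G (fun a i row => pvAInner i (vals row i) a.1 a.2) G 0 List.drop_zero
      (List.replicate lrl.toNat 0, List.replicate G.length 0)).trans ?_
  have hstep : (fun (st : List Int × List Int) (p : List String × Nat) =>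
        pvAInner p.2 (vals p.1 p.2) st.1 st.2)
      = fun st p => ((fun ws (p : List String × Nat) => pvWgo ws 0 (vals p.1 p.2)) st.1 p,
                     (fun hs (p : List String × Nat) => pvHgo p.2 hs (vals p.1 p.2)) st.2 p) := by
    funext st p
    exact pvAInner_spec p.2 (vals p.1 p.2) st.1 st.2
  rw [hstep]
  rw [PySem.List.foldl_prod_mk (fun ws (p : List String × Nat) => pvWgo ws 0 (vals p.1 p.2))
      (fun hs (p : List String × Nat) => pvHgo p.2 hs (vals p.1 p.2)) (G.zipIdx 0)
      (List.replicate lrl.toNat 0) (List.replicate G.length 0)]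
  have hW : (G.zipIdx 0).foldl (fun ws p => pvWgo ws 0 (vals p.1 p.2)) (List.replicate lrl.toNat 0)
      = ((((G.zipIdx 0).map (fun p => vals p.1 p.2)).foldl (fun cols row => pvColsAdd cols 0 row)
            ((List.range ncolsB.toNat).map (fun _ => []))).map
              (fun col => PySem.List.maxD (col.map pvCellWidth) (fun x => x) 0)) := by
    rw [← List.foldl_map (f := fun (p : List String × Nat) => vals p.1 p.2)
        (g := fun ws row => pvWgo ws 0 row)]
    refine List.ext_getElem ?_ ?_
    · rw [pvW_fold_len]
      simp [pvCols_fold_len, ← hncols]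
    · intro i h1 h2
      have hi : i < (List.replicate lrl.toNat (0 : Int)).length := by
        rw [← pvW_fold_len ((G.zipIdx 0).map (fun p => vals p.1 p.2)) (List.replicate lrl.toNat 0)]
        exact h1
      have hi0 : i < ((List.range ncolsB.toNat).map (fun _ => ([] : List String))).length := by
        simp only [List.length_map, List.length_range]
        rw [← hncols]
        simpa using hi
      rw [← List.getD_eq_getElem _ 0 h1, pvW_fold_getD _ _ i hi, pv_getD_replicate,
          pv_cond_col,
          List.map_congr_left (fun c (_ : c ∈ pvCol i ((G.zipIdx 0).map (fun p => vals p.1 p.2)))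
            => (pv_cellWidth_eq c).symm),
          ← pv_maxD_eq_foldl _ ?_]
      · rw [List.getElem_map,
            ← List.getD_eq_getElem _ [] (by rw [pvCols_fold_len]; exact hi0),
            pvCols_fold_getD _ _ i hi0, pv_getD_range_nil, List.nil_append]
      · intro x hx
        simp only [List.mem_map] at hx
        obtain ⟨c, _, rfl⟩ := hx
        rw [pv_cellWidth_eq]
        have := pv_lls_nonneg c
        omega
  have hH : (G.zipIdx 0).foldl (fun hs p => pvHgo p.2 hs (vals p.1 p.2)) (List.replicate G.length 0)
      = ((G.zipIdx 0).map (fun p => vals p.1 p.2)).map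
          (fun row => PySem.List.maxD (row.map pvCellHeight) (fun x => x) 0) := by
    have hidx := pv_zipIdx_map_idx G vals 0
    have hfold : (((G.zipIdx 0).map (fun p => vals p.1 p.2)).zipIdx 0).foldl
          (fun hs (q : List String × Nat) => pvHgo q.2 hs q.1) (List.replicate G.length 0)
        = (G.zipIdx 0).foldl (fun hs p => pvHgo p.2 hs (vals p.1 p.2)) (List.replicate G.length 0) := by
      rw [hidx, List.foldl_map]
    rw [← hfold]
    have hlen : G.length = ((G.zipIdx 0).map (fun p => vals p.1 p.2)).length := by
      simp
    have hpre := pvH_fold ((G.zipIdx 0).map (fun p => vals p.1 p.2)) []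
    simp only [List.length_nil, List.nil_append] at hpre
    rw [hlen, hpre]
    refine List.map_congr_left ?_
    intro row _
    rw [pv_maxD_eq_foldl]
    · rfl
    · intro x hx
      simp only [List.mem_map] at hx
      obtain ⟨c, _, rfl⟩ := hx
      exact pv_cellHeight_nonneg c
  rw [hW, hH]

-- ===== VERDICT (by name: the statement is the Claim_ definition above) =====
theorem tablify_calc_row_widths_heights_spec : Claim_equal_tablify_calc_row_widths_heights := by
  intro rows rowheadings headings _dom _pre
  unfold Spec_tablify_calc_row_widths_heights
  cases rowheadings with
  | none =>
    cases headings with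
    | none =>
      refine Eq.trans (pv_main (fun row _ => ([] : List String) ++ row) rows
        ((PySem.List.enumerate rows).map (fun p => ([] : List String) ++ p.2))
        (pvLongestRowLength rows none none)
        (0 + PySem.List.maxD ((rows ++ []).map PySem.List.len) (fun x => x) 0) ?_ ?_) rfl
      · exact pv_enum_noidx (fun row => [] ++ row) rows 0 0
      · simp only [pvLongestRowLength]
        rw [pv_len_fold]
        exact (Int.zero_add _).symm
    | some h =>
      refine Eq.trans (pv_main (fun row _ => ([] : List String) ++ row) (h :: rows)
        ((([] : List String) ++ h) :: (PySem.List.enumerate rows).map (fun p => ([] : List String) ++ p.2))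
        (pvLongestRowLength rows none (some h))
        (0 + PySem.List.maxD ((rows ++ [h]).map PySem.List.len) (fun x => x) 0) ?_ ?_) rfl
      · rw [List.zipIdx_cons, List.map_cons]
        exact congrArg (List.cons _) (pv_enum_noidx (fun row => [] ++ row) rows 0 1)
      · simp only [pvLongestRowLength]
        rw [pv_len_fold]
        exact (Int.zero_add _).symm
  | some rh =>
    cases headings with
    | none =>
      refine Eq.trans (pv_main (fun row i => [rh.getD i ""] ++ row) rows
        ((PySem.List.enumerate rows).map (fun p => [PySem.List.pyGetD rh p.1 ""] ++ p.2))
        (pvLongestRowLength rows (some rh) none)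
        (1 + PySem.List.maxD ((rows ++ []).map PySem.List.len) (fun x => x) 0) ?_ ?_) rfl
      · have := pv_enum_zip rh rh 0 (fun k => by simp) rows 0
        simpa using this
      · simp only [pvLongestRowLength]
        rw [pv_len_fold]
        exact Int.add_comm _ _
    | some h =>
      refine Eq.trans (pv_main (fun row i => [("" :: rh).getD i ""] ++ row) (h :: rows)
        ((([""] : List String) ++ h) :: (PySem.List.enumerate rows).map
          (fun p => [PySem.List.pyGetD rh p.1 ""] ++ p.2))
        (pvLongestRowLength rows (some rh) (some h))
        (1 + PySem.List.maxD ((rows ++ [h]).map PySem.List.len) (fun x => x) 0) ?_ ?_) rfl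
      · rw [List.zipIdx_cons, List.map_cons]
        refine congrArg (List.cons _) ?_
        have := pv_enum_zip rh ("" :: rh) 1 (fun k => by simp) rows 0
        simpa using this
      · simp only [pvLongestRowLength]
        rw [pv_len_fold]
        exact Int.add_comm _ _
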